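-- pv_equiv track=rewrite | github.com/Semih1997/CodingBat-Java-Problems-in-Python | Codingbat Java String-3/QequalIsNot.py | equalIsNot
-- ===== SOURCE A (Python) =====
-- def equalIsNot(a):
--     i = 0
--     control = False
--     count_is = 0
--     count_not = 0
--     while i < len(a):
--         if a[i:i+2] == "is":
--             count_is += 1
--             i += 1
--         if a[i:i+3] == "not":
--             count_not += 1
--             i += 1
--         else:
--             i += 1
--     if count_not == count_is:
--         control = True
--     return control
-- ===== SOURCE B (Python) =====
-- def equalIsNot(a):
--     return a.count("is") == a.count("not")
-- ===== Notes on version B (the rewrite author's own statement) =====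
-- stated objective: simpler
-- what changed: Replaces A's single interleaved index-stepping scan (counts maintained in one loop with a double advance after a match) by two independent built-in substring counts compared for equality; exact because neither target substring self-overlaps, so A's scan visits every occurrence exactly once.
import Mathlib
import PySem

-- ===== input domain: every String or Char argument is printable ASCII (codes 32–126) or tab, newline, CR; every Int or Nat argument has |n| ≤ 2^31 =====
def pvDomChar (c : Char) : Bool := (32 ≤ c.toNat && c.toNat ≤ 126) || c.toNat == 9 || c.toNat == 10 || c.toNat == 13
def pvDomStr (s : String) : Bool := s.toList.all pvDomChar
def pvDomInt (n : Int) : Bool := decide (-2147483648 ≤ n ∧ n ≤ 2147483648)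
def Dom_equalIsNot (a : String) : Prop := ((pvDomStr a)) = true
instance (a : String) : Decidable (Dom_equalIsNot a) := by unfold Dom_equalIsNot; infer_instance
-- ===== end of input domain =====

-- B replaces A's single interleaved index-stepping scan by two built-in substring counts compared for equality (simpler; a timing run measured it faster by a constant factor).

-- ===== PORT A =====
-- A's while loop over index i with the two sequential slice tests; Lean mutation-free form:
-- after the "is" branch fires (i += 1), the subsequent "not" test is re-checked at i+1, then i += 1 again.
def eqLoopA (s : List Char) (i ci cn : Nat) : Bool :=
  if _h : i < s.length then
    if PySem.Chars.slice s (some (i : Int)) (some ((i : Int) + 2)) = ['i', 's'] then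
      -- count_is += 1; i += 1; then the second if at the advanced index
      if PySem.Chars.slice s (some ((i : Int) + 1)) (some ((i : Int) + 1 + 3)) = ['n', 'o', 't'] then
        eqLoopA s (i + 2) (ci + 1) (cn + 1)
      else
        eqLoopA s (i + 2) (ci + 1) cn
    else
      if PySem.Chars.slice s (some (i : Int)) (some ((i : Int) + 3)) = ['n', 'o', 't'] then
        eqLoopA s (i + 1) ci (cn + 1)
      else
        eqLoopA s (i + 1) ci cn
  else
    cn == ci   -- control = (count_not == count_is)
termination_by s.length - i
decreasing_by all_goals omega

def equalIsNot (a : String) : Bool := eqLoopA a.toList 0 0 0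

-- ===== PORT B =====
def equalIsNot_alt (a : String) : Bool := PySem.Str.count a "is" == PySem.Str.count a "not"

-- ===== PRECONDITION & SPEC =====
def Spec_equalIsNot (a : String) (out : Bool) : Prop := out = equalIsNot_alt a
instance (a : String) (out : Bool) : Decidable (Spec_equalIsNot a out) := by unfold Spec_equalIsNot; infer_instance

-- ===== CLAIM (what is proved, stated in full; the proofs are below) =====
def Claim_equal_equalIsNot : Prop := ∀ (a : String), Dom_equalIsNot a → Spec_equalIsNot a (equalIsNot a)

-- ===== LEMMAS AND PROOFS =====

lemma countGo_zero (sub l : List Char) (acc : Nat) :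
    PySem.Chars.count.go sub 0 l acc = acc := rfl

lemma countGo_nil (sub : List Char) (fuel acc : Nat) :
    PySem.Chars.count.go sub fuel [] acc = acc := by
  cases fuel <;> rfl

lemma countGo_succ (sub : List Char) (fuel : Nat) (c : Char) (t : List Char) (acc : Nat) :
    PySem.Chars.count.go sub (fuel + 1) (c :: t) acc =
      if sub.isPrefixOf (c :: t) then
        PySem.Chars.count.go sub fuel (List.drop sub.length (c :: t)) (acc + 1)
      else
        PySem.Chars.count.go sub fuel t acc := rfl

lemma countGo_acc (sub : List Char) :
    ∀ (fuel : Nat) (l : List Char) (acc : Nat),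
      PySem.Chars.count.go sub fuel l acc = acc + PySem.Chars.count.go sub fuel l 0 := by
  intro fuel
  induction fuel with
  | zero => intro l acc; rfl
  | succ n ih =>
    intro l acc
    cases l with
    | nil => rw [countGo_nil, countGo_nil]; omega
    | cons c t =>
      rw [countGo_succ, countGo_succ]
      split
      · rw [ih (List.drop sub.length (c :: t)) (acc + 1),
            ih (List.drop sub.length (c :: t)) (0 + 1)]
        omega
      · rw [ih t acc, ih t 0]

lemma countGo_fuel (sub : List Char) (hsub : sub ≠ []) :
    ∀ (fuel : Nat) (l : List Char) (acc : Nat), l.length ≤ fuel →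
      PySem.Chars.count.go sub fuel l acc = PySem.Chars.count.go sub l.length l acc := by
  intro fuel
  induction fuel using Nat.strong_induction_on with
  | _ fuel ih =>
    intro l acc h
    cases l with
    | nil => rw [countGo_nil, countGo_nil]
    | cons c t =>
      cases fuel with
      | zero => simp at h
      | succ m =>
        have h1 : 1 ≤ sub.length := by cases sub <;> simp_all
        have hd : (List.drop sub.length (c :: t)).length ≤ t.length := by
          simp only [List.length_drop, List.length_cons]; omega
        have htm : t.length ≤ m := by simp at h; omega
        rw [List.length_cons, countGo_succ, countGo_succ]
        split
        · rw [ih m (by omega) _ _ (le_trans hd htm),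
              ih t.length (by omega) _ _ hd]
        · rw [ih m (by omega) t acc htm]

lemma count_nil (sub : List Char) (hsub : sub ≠ []) :
    PySem.Chars.count [] sub = 0 := by
  have hne : sub.isEmpty = false := by simp [hsub]
  simp [PySem.Chars.count, hne, countGo_zero]

lemma count_cons (sub : List Char) (hsub : sub ≠ []) (c : Char) (t : List Char) :
    PySem.Chars.count (c :: t) sub =
      if sub.isPrefixOf (c :: t) then
        PySem.Chars.count (List.drop sub.length (c :: t)) sub + 1
      else
        PySem.Chars.count t sub := by
  have hne : sub.isEmpty = false := by simp [hsub]
  have hd : (List.drop sub.length (c :: t)).length ≤ t.length := by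
    have h1 : 1 ≤ sub.length := by cases sub <;> simp_all
    simp only [List.length_drop, List.length_cons]; omega
  simp only [PySem.Chars.count, hne, Bool.false_eq_true, if_false, List.length_cons]
  rw [countGo_succ]
  split
  · rw [countGo_fuel sub hsub t.length _ _ hd, countGo_acc]
    omega
  · rfl

lemma isPrefixOf_iff_take (p l : List Char) :
    p.isPrefixOf l = true ↔ l.take p.length = p := by
  rw [List.isPrefixOf_iff_prefix, List.prefix_iff_eq_take]
  exact comm

lemma take2_shape {l : List Char} (h : l.take 2 = ['i', 's']) :
    ∃ t, l = 'i' :: 's' :: t := by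
  cases l with
  | nil => simp at h
  | cons a u =>
    cases u with
    | nil => simp at h
    | cons b v =>
      simp only [List.take_succ_cons, List.take_zero] at h
      obtain ⟨ha, hb, -⟩ : a = 'i' ∧ b = 's' ∧ True := by
        simpa using h
      exact ⟨v, by rw [ha, hb]⟩

lemma take3_shape {l : List Char} (h : l.take 3 = ['n', 'o', 't']) :
    ∃ t, l = 'n' :: 'o' :: 't' :: t := by
  cases l with
  | nil => simp at h
  | cons a u =>
    cases u with
    | nil => simp at h
    | cons b v =>
      cases v with
      | nil => simp at h
      | cons d w =>
        simp only [List.take_succ_cons, List.take_zero] at h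
        obtain ⟨ha, hb, hd, -⟩ : a = 'n' ∧ b = 'o' ∧ d = 't' ∧ True := by
          simpa using h
        exact ⟨w, by rw [ha, hb, hd]⟩

lemma sliceNat (s : List Char) (a b : Nat) :
    PySem.Chars.slice s (some (a : Int)) (some (b : Int)) = (s.drop a).take (b - a) := by
  rw [PySem.Chars.slice_eq_listSlice,
      PySem.List.slice_toNat s (a := (a : Int)) (b := (b : Int)) (by omega) (by omega)]
  congr 1

lemma slice2 (s : List Char) (i : Nat) :
    PySem.Chars.slice s (some (i : Int)) (some ((i : Int) + 2)) = (s.drop i).take 2 := by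
  have h : ((i : Int) + 2) = ((i + 2 : Nat) : Int) := by push_cast; ring
  rw [h, sliceNat]
  congr 1
  omega

lemma slice3 (s : List Char) (i : Nat) :
    PySem.Chars.slice s (some (i : Int)) (some ((i : Int) + 3)) = (s.drop i).take 3 := by
  have h : ((i : Int) + 3) = ((i + 3 : Nat) : Int) := by push_cast; ring
  rw [h, sliceNat]
  congr 1
  omega

lemma slice13 (s : List Char) (i : Nat) :
    PySem.Chars.slice s (some ((i : Int) + 1)) (some ((i : Int) + 1 + 3)) =
      (s.drop (i + 1)).take 3 := by
  have h1 : ((i : Int) + 1) = ((i + 1 : Nat) : Int) := by push_cast; ring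
  have h4 : ((i : Int) + 1 + 3) = ((i + 4 : Nat) : Int) := by push_cast; ring
  rw [h4, h1, sliceNat]
  congr 1
  omega

lemma natBeqComm (a b : Nat) : (a == b) = (b == a) := by
  by_cases h : a = b
  · simp [h]
  · simp [h, Ne.symm h]

lemma drop_succ_eq (s : List Char) (i : Nat) :
    s.drop (i + 1) = (s.drop i).drop 1 := by
  rw [List.drop_drop]

lemma drop_two_eq (s : List Char) (i : Nat) :
    s.drop (i + 2) = (s.drop i).drop 2 := by
  rw [List.drop_drop]

lemma eqLoopA_eq (s : List Char) :
    ∀ (n i ci cn : Nat), s.length - i ≤ n →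
      eqLoopA s i ci cn =
        ((cn + PySem.Chars.count (s.drop i) ['n', 'o', 't']) ==
         (ci + PySem.Chars.count (s.drop i) ['i', 's'])) := by
  have hnotnil : (['n', 'o', 't'] : List Char) ≠ [] := by simp
  have hisnil : (['i', 's'] : List Char) ≠ [] := by simp
  intro n
  induction n with
  | zero =>
    intro i ci cn h
    have hi : ¬ i < s.length := by omega
    rw [eqLoopA]
    simp [hi, List.drop_eq_nil_of_le (by omega : s.length ≤ i),
          count_nil _ hnotnil, count_nil _ hisnil]
  | succ n ih =>
    intro i ci cn h
    by_cases hi : i < s.length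
    · rw [eqLoopA]
      simp only [hi, dif_pos, slice2, slice3, slice13]
      by_cases his : (s.drop i).take 2 = ['i', 's']
      · -- "is" matched: the shifted "not" test cannot fire (it starts at 's')
        obtain ⟨t, ht⟩ := take2_shape his
        have hd1 : s.drop (i + 1) = 's' :: t := by
          rw [drop_succ_eq, ht]; rfl
        have hd2 : s.drop (i + 2) = t := by
          rw [drop_two_eq, ht]; rfl
        have hnot : ¬ (s.drop (i + 1)).take 3 = ['n', 'o', 't'] := by
          rw [hd1]; simp
        rw [if_pos his, if_neg hnot, ih (i + 2) (ci + 1) cn (by omega), hd2]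
        have cis : PySem.Chars.count (s.drop i) ['i', 's'] =
            PySem.Chars.count t ['i', 's'] + 1 := by
          rw [ht, count_cons _ hisnil,
              if_pos ((isPrefixOf_iff_take _ _).2 (by rw [← ht]; exact his))]
          rfl
        have cnot : PySem.Chars.count (s.drop i) ['n', 'o', 't'] =
            PySem.Chars.count t ['n', 'o', 't'] := by
          rw [ht, count_cons _ hnotnil, if_neg (by simp [List.isPrefixOf]),
              count_cons _ hnotnil, if_neg (by simp [List.isPrefixOf])]
        rw [cis, cnot]
        congr 1
        omega
      · rw [if_neg his]
        have hne : s.drop i ≠ [] := by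
          intro hc
          have : (s.drop i).length = 0 := by rw [hc]; rfl
          rw [List.length_drop] at this; omega
        obtain ⟨c, t, hct⟩ := List.exists_cons_of_ne_nil hne
        have hd1 : s.drop (i + 1) = t := by
          rw [drop_succ_eq, hct]; rfl
        by_cases hno : (s.drop i).take 3 = ['n', 'o', 't']
        · -- "not" matched at i
          obtain ⟨t', ht'⟩ := take3_shape hno
          have hd1' : s.drop (i + 1) = 'o' :: 't' :: t' := by
            rw [drop_succ_eq, ht']; rfl
          rw [if_pos hno, ih (i + 1) ci (cn + 1) (by omega), hd1']
          have cnot : PySem.Chars.count (s.drop i) ['n', 'o', 't'] =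
              PySem.Chars.count t' ['n', 'o', 't'] + 1 := by
            rw [ht', count_cons _ hnotnil,
                if_pos ((isPrefixOf_iff_take _ _).2 (by rw [← ht']; exact hno))]
            rfl
          have cnot2 : PySem.Chars.count ('o' :: 't' :: t') ['n', 'o', 't'] =
              PySem.Chars.count t' ['n', 'o', 't'] := by
            rw [count_cons _ hnotnil, if_neg (by simp [List.isPrefixOf]),
                count_cons _ hnotnil, if_neg (by simp [List.isPrefixOf])]
          have cis : PySem.Chars.count (s.drop i) ['i', 's'] =
              PySem.Chars.count ('o' :: 't' :: t') ['i', 's'] := by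
            rw [ht', count_cons _ hisnil, if_neg (by simp [List.isPrefixOf])]
          rw [cnot, cnot2, cis]
          congr 1
          omega
        · -- neither matched at i
          rw [if_neg hno, ih (i + 1) ci cn (by omega), hd1]
          have cis : PySem.Chars.count (s.drop i) ['i', 's'] =
              PySem.Chars.count t ['i', 's'] := by
            rw [hct, count_cons _ hisnil, if_neg]
            intro hp
            exact his (by rw [hct]; exact (isPrefixOf_iff_take _ _).1 hp)
          have cnot : PySem.Chars.count (s.drop i) ['n', 'o', 't'] =
              PySem.Chars.count t ['n', 'o', 't'] := by
            rw [hct, count_cons _ hnotnil, if_neg]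
            intro hp
            exact hno (by rw [hct]; exact (isPrefixOf_iff_take _ _).1 hp)
          rw [cis, cnot]
    · rw [eqLoopA]
      have hd : s.drop i = [] := List.drop_eq_nil_of_le (by omega)
      simp [hi, hd, count_nil _ hnotnil, count_nil _ hisnil]

-- ===== VERDICT (by name: the statement is the Claim_ definition above) =====
theorem equalIsNot_spec : Claim_equal_equalIsNot := by
  intro a _
  unfold Spec_equalIsNot equalIsNot equalIsNot_alt
  rw [eqLoopA_eq a.toList a.toList.length 0 0 0 (by omega)]
  simp [PySem.Str.count_eq, natBeqComm]
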